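-- pv_equiv track=rewrite | github.com/krishnar9/CrosswordSolver | app/services/parser.py | _extract_clueinfo
-- ===== SOURCE A (Python) =====
-- def _extract_clueinfo(
--     grid: list[list[int]], transpose: int = 0
-- ) -> dict[int, tuple[int, tuple[int, int]]]:
--     """Return {clue_num: (answer_length, (row, col))} from the grid.
--
--     Pass transpose=1 for the Down pass (grid is transposed; coords are swapped back).
--     """
--     clueinfo: dict[int, tuple[int, tuple[int, int]]] = {}
--     for row_num, row in enumerate(grid):
--         clue, length, loc = 0, 0, (0, 0)
--         for col_num, cell in enumerate(row):
--             if cell == -1: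
--                 if length > 1:
--                     clueinfo[clue] = (length, loc)
--                 clue, length, loc = 0, 0, (0, 0)
--                 continue
--             elif cell == 0:
--                 length += 1
--             else:
--                 if clue == 0:
--                     loc = (row_num, col_num) if transpose == 0 else (col_num, row_num)
--                     clue = cell
--                     length = 0
--                 length += 1
--         if length > 1:
--             clueinfo[clue] = (length, loc)
--     return clueinfo
-- ===== SOURCE B (Python) =====
-- def _extract_clueinfo(
--     grid: list[list[int]], transpose: int = 0
-- ) -> dict[int, tuple[int, tuple[int, int]]]:
--     """Return {clue_num: (answer_length, (row, col))} from the grid.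
--
--     Two-phase rewrite: split each row into maximal -1-free runs (tagged with
--     their start column), then derive each run's clue entry directly.
--     """
--     clueinfo: dict[int, tuple[int, tuple[int, int]]] = {}
--     for row_num, row in enumerate(grid):
--         runs: list[tuple[int, list[int]]] = []
--         start, cur = 0, []
--         for col_num, cell in enumerate(row):
--             if cell == -1:
--                 runs.append((start, cur))
--                 start, cur = col_num + 1, []
--             else:
--                 cur.append(cell)
--         runs.append((start, cur))
--         for start, run in runs:
--             idx = next((i for i, c in enumerate(run) if c != 0), None)
--             if idx is None:
--                 clue, length, loc = 0, len(run), (0, 0)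
--             else:
--                 clue = run[idx]
--                 length = len(run) - idx
--                 c = start + idx
--                 loc = (row_num, c) if transpose == 0 else (c, row_num)
--             if length > 1:
--                 clueinfo[clue] = (length, loc)
--     return clueinfo
-- ===== Notes on version B (the rewrite author's own statement) =====
-- stated objective: alternative
-- what changed: Replaces A's single stateful scan (clue/length/loc registers reset at -1 cells) by a two-phase decomposition: split each row into maximal -1-free runs with start columns, then compute each run's clue entry directly from the index of its first nonzero cell.
import Mathlib
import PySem

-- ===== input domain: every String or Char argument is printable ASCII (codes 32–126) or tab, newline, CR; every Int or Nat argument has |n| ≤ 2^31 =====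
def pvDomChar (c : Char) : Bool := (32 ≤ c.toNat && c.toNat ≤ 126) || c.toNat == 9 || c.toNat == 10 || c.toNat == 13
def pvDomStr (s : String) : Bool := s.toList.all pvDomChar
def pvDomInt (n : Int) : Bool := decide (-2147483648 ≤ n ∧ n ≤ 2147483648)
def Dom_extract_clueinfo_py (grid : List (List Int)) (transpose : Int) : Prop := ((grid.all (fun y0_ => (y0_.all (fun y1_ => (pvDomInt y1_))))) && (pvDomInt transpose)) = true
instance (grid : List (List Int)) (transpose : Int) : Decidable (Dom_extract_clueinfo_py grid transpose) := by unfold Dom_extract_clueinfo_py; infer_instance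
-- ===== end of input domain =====

-- B restructures A (split rows into -1-delimited runs, then process runs); return values proved equal, no side effects involved.

-- ===== PORT A =====
-- inner loop of A over one row: state (dict, clue, length, loc), column counter `col`;
-- the `[]` case is the post-loop flush `if length > 1: clueinfo[clue] = (length, loc)`
def aInner (transpose row_num : Int) (cells : List Int) (col : Int)
    (d : PySem.Dict Int (Int × (Int × Int))) (clue length : Int) (loc : Int × Int) :
    PySem.Dict Int (Int × (Int × Int)) :=
  match cells with
  | [] => if length > 1 then d.insert clue (length, loc) else d
  | cell :: rest =>
    if cell = -1 then
      aInner transpose row_num rest (col + 1)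
        (if length > 1 then d.insert clue (length, loc) else d) 0 0 (0, 0)
    else if cell = 0 then
      aInner transpose row_num rest (col + 1) d clue (length + 1) loc
    else if clue = 0 then
      -- clue = cell, length = 0 then length += 1
      aInner transpose row_num rest (col + 1) d cell 1
        (if transpose = 0 then (row_num, col) else (col, row_num))
    else
      aInner transpose row_num rest (col + 1) d clue (length + 1) loc

def extract_clueinfo_py (grid : List (List Int)) (transpose : Int) : List (Int × Int × (Int × Int)) :=
  (grid.foldl
    (fun (st : PySem.Dict Int (Int × (Int × Int)) × Int) row =>
      (aInner transpose st.2 row 0 st.1 0 0 (0, 0), st.2 + 1))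
    (PySem.Dict.empty, 0)).1.items

-- ===== PORT B =====
-- next((i for i, c in enumerate(run) if c != 0), None)
def bFirstNZ : List Int → Option Nat
  | [] => none
  | c :: rest => if c ≠ 0 then some 0 else (bFirstNZ rest).map (· + 1)

-- the run-splitting loop of B: state (runs, start, cur, col_num) — col_num is Python's enumerate counter
def bSplit (row : List Int) : List (Int × List Int) :=
  let st := row.foldl
    (fun (st : List (Int × List Int) × Int × List Int × Int) cell =>
      if cell = -1 then (st.1 ++ [(st.2.1, st.2.2.1)], st.2.2.2 + 1, [], st.2.2.2 + 1)
      else (st.1, st.2.1, st.2.2.1 ++ [cell], st.2.2.2 + 1)) ([], 0, [], 0)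
  st.1 ++ [(st.2.1, st.2.2.1)]

-- body of B's `for start, run in runs` loop
def bProcessRun (transpose row_num : Int) (d : PySem.Dict Int (Int × (Int × Int)))
    (sr : Int × List Int) : PySem.Dict Int (Int × (Int × Int)) :=
  match bFirstNZ sr.2 with
  | none =>
    if ((sr.2.length : Int)) > 1 then d.insert 0 ((sr.2.length : Int), (0, 0)) else d
  | some idx =>
    let clue := sr.2.getD idx 0          -- run[idx]; idx is always in range
    let length : Int := (sr.2.length : Int) - (idx : Int)
    let c : Int := sr.1 + (idx : Int)
    let loc := if transpose = 0 then (row_num, c) else (c, row_num)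
    if length > 1 then d.insert clue (length, loc) else d

def extract_clueinfo_py_alt (grid : List (List Int)) (transpose : Int) : List (Int × Int × (Int × Int)) :=
  (grid.foldl
    (fun (st : PySem.Dict Int (Int × (Int × Int)) × Int) row =>
      ((bSplit row).foldl (bProcessRun transpose st.2) st.1, st.2 + 1))
    (PySem.Dict.empty, 0)).1.items

-- ===== PRECONDITION & SPEC =====
def Spec_extract_clueinfo_py (grid : List (List Int)) (transpose : Int) (out : List (Int × Int × (Int × Int))) : Prop := out = extract_clueinfo_py_alt grid transpose
instance (grid : List (List Int)) (transpose : Int) (out : List (Int × Int × (Int × Int))) : Decidable (Spec_extract_clueinfo_py grid transpose out) := by unfold Spec_extract_clueinfo_py; infer_instance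

-- ===== CLAIM (what is proved, stated in full; the proofs are below) =====
def Claim_equal_extract_clueinfo_py : Prop := ∀ (grid : List (List Int)) (transpose : Int), Dom_extract_clueinfo_py grid transpose → Spec_extract_clueinfo_py grid transpose (extract_clueinfo_py grid transpose)

-- ===== LEMMAS AND PROOFS =====

-- recursive characterisation of the run split: (first run, later runs with their start columns)
def sR (c : Int) : List Int → List Int × List (Int × List Int)
  | [] => ([], [])
  | x :: rest =>
    if x = -1 then ([], (c + 1, (sR (c + 1) rest).1) :: (sR (c + 1) rest).2)
    else (x :: (sR (c + 1) rest).1, (sR (c + 1) rest).2)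

-- bProcessRun generalised with `len` pending leading zeros of the run already consumed
def procP (transpose row_num len : Int) (d : PySem.Dict Int (Int × (Int × Int)))
    (sr : Int × List Int) : PySem.Dict Int (Int × (Int × Int)) :=
  match bFirstNZ sr.2 with
  | none =>
    if len + (sr.2.length : Int) > 1 then d.insert 0 (len + (sr.2.length : Int), (0, 0)) else d
  | some idx =>
    let clue := sr.2.getD idx 0
    let length : Int := (sr.2.length : Int) - (idx : Int)
    let c : Int := sr.1 + (idx : Int)
    let loc := if transpose = 0 then (row_num, c) else (c, row_num)
    if length > 1 then d.insert clue (length, loc) else d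

lemma procP_zero (t rn : Int) (d : PySem.Dict Int (Int × (Int × Int))) (sr : Int × List Int) :
    procP t rn 0 d sr = bProcessRun t rn d sr := by
  unfold procP bProcessRun
  cases bFirstNZ sr.2 <;> simp

lemma procP_nil (t rn len : Int) (d : PySem.Dict Int (Int × (Int × Int))) (s : Int) :
    procP t rn len d (s, []) = if len > 1 then d.insert 0 (len, (0, 0)) else d := by
  unfold procP
  simp [bFirstNZ]

lemma procP_shift_zero (t rn len s : Int) (d : PySem.Dict Int (Int × (Int × Int))) (r : List Int) :
    procP t rn len d (s, (0 : Int) :: r) = procP t rn (len + 1) d (s + 1, r) := by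
  unfold procP
  simp only [bFirstNZ, if_neg (by simp : ¬ (0:Int) ≠ 0)]
  cases h : bFirstNZ r with
  | none =>
    simp only [Option.map_none, List.length_cons]
    push_cast
    ring_nf
  | some idx =>
    simp only [Option.map_some, List.getD_cons_succ, List.length_cons]
    push_cast
    ring_nf

lemma procP_cons_nz (t rn len s v : Int) (d : PySem.Dict Int (Int × (Int × Int)))
    (r : List Int) (hv : v ≠ 0) :
    procP t rn len d (s, v :: r) =
      (if 1 + (r.length : Int) > 1 then
        d.insert v (1 + (r.length : Int), if t = 0 then (rn, s) else (s, rn)) else d) := by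
  unfold procP
  rw [show bFirstNZ (v :: r) = some 0 from by simp [bFirstNZ, hv]]
  simp only [List.getD_cons_zero, List.length_cons]
  push_cast
  ring_nf

-- joint invariant: A's inner loop from either shape of state equals B's run processing
lemma aInner_sR (t rn : Int) (cells : List Int) :
    (∀ col d len, aInner t rn cells col d 0 len (0, 0) =
      (sR col cells).2.foldl (bProcessRun t rn) (procP t rn len d (col, (sR col cells).1))) ∧
    (∀ col d clue k loc, clue ≠ 0 → aInner t rn cells col d clue k loc =
      (sR col cells).2.foldl (bProcessRun t rn)
        (if k + ((sR col cells).1.length : Int) > 1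
         then d.insert clue (k + ((sR col cells).1.length : Int), loc) else d)) := by
  induction cells with
  | nil =>
    constructor
    · intro col d len
      simp [aInner, sR, procP_nil]
    · intro col d clue k loc hc
      simp [aInner, sR]
  | cons cell rest ih =>
    obtain ⟨ih0, ih1⟩ := ih
    have hsm : ∀ col, sR col ((-1 : Int) :: rest)
        = ([], (col + 1, (sR (col + 1) rest).1) :: (sR (col + 1) rest).2) := by
      intro col; simp [sR]
    have hsz : ∀ col, sR col ((0 : Int) :: rest)
        = (0 :: (sR (col + 1) rest).1, (sR (col + 1) rest).2) := by
      intro col; simp [sR]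
    have hsc : ∀ col, cell ≠ -1 → sR col (cell :: rest)
        = (cell :: (sR (col + 1) rest).1, (sR (col + 1) rest).2) := by
      intro col hm; simp [sR, hm]
    constructor
    · intro col d len
      by_cases hm : cell = -1
      · subst hm
        rw [hsm col, List.foldl_cons, procP_nil,
          ← procP_zero t rn _ (col + 1, (sR (col + 1) rest).1), ← ih0 (col + 1) _ 0]
        simp [aInner]
      · by_cases hz : cell = 0
        · subst hz
          rw [hsz col, procP_shift_zero, ← ih0 (col + 1) d (len + 1)]
          simp [aInner]
        · rw [hsc col hm, procP_cons_nz t rn len col cell d _ hz,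
            ← ih1 (col + 1) d cell 1 _ hz]
          simp [aInner, hm, hz]
    · intro col d clue k loc hc
      by_cases hm : cell = -1
      · subst hm
        rw [show aInner t rn ((-1 : Int) :: rest) col d clue k loc
            = aInner t rn rest (col + 1)
                (if k > 1 then d.insert clue (k, loc) else d) 0 0 (0, 0) from by simp [aInner],
          ih0 (col + 1) _ 0, procP_zero, hsm col, List.foldl_cons]
        simp
      · by_cases hz : cell = 0
        · subst hz
          rw [show aInner t rn ((0 : Int) :: rest) col d clue k loc
              = aInner t rn rest (col + 1) d clue (k + 1) loc from by simp [aInner],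
            ih1 (col + 1) d clue (k + 1) loc hc, hsz col]
          simp only [List.length_cons]
          push_cast
          ring_nf
        · rw [show aInner t rn (cell :: rest) col d clue k loc
              = aInner t rn rest (col + 1) d clue (k + 1) loc from by
                simp [aInner, hm, hz, hc],
            ih1 (col + 1) d clue (k + 1) loc hc, hsc col hm]
          simp only [List.length_cons]
          push_cast
          ring_nf

-- the "append the final run" step of B's split
def bFin (st : List (Int × List Int) × Int × List Int × Int) : List (Int × List Int) :=
  st.1 ++ [(st.2.1, st.2.2.1)]

-- B's splitting loop computes sR (generalised over the loop state)
lemma bSplit_loop (cells : List Int) :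
    ∀ (acc : List (Int × List Int)) (start : Int) (cur : List Int) (col : Int),
    bFin (cells.foldl
      (fun (st : List (Int × List Int) × Int × List Int × Int) cell =>
        if cell = -1 then (st.1 ++ [(st.2.1, st.2.2.1)], st.2.2.2 + 1, [], st.2.2.2 + 1)
        else (st.1, st.2.1, st.2.2.1 ++ [cell], st.2.2.2 + 1)) (acc, start, cur, col)) =
    acc ++ (start, cur ++ (sR col cells).1) :: (sR col cells).2 := by
  induction cells with
  | nil => intro acc start cur col; simp [bFin, sR]
  | cons cell rest ih =>
    intro acc start cur col
    simp only [List.foldl_cons]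
    by_cases hm : cell = -1
    · subst hm
      rw [if_pos rfl, ih]
      simp [sR]
    · rw [if_neg hm, ih]
      simp [sR, hm]

lemma bSplit_eq (row : List Int) :
    bSplit row = (0, (sR 0 row).1) :: (sR 0 row).2 := by
  have h := bSplit_loop row [] 0 [] 0
  simpa [bSplit, bFin] using h

-- one row: A's inner loop equals B's split-then-process
lemma row_eq (t rn : Int) (row : List Int) (d : PySem.Dict Int (Int × (Int × Int))) :
    aInner t rn row 0 d 0 0 (0, 0) = (bSplit row).foldl (bProcessRun t rn) d := by
  rw [bSplit_eq, List.foldl_cons, ← procP_zero t rn d (0, (sR 0 row).1)]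
  exact (aInner_sR t rn row).1 0 d 0

-- ===== VERDICT (by name: the statement is the Claim_ definition above) =====
theorem extract_clueinfo_py_spec : Claim_equal_extract_clueinfo_py := by
  intro grid transpose _
  unfold Spec_extract_clueinfo_py extract_clueinfo_py extract_clueinfo_py_alt
  have h : (fun (st : PySem.Dict Int (Int × (Int × Int)) × Int) (row : List Int) =>
        (aInner transpose st.2 row 0 st.1 0 0 (0, 0), st.2 + 1))
      = (fun (st : PySem.Dict Int (Int × (Int × Int)) × Int) (row : List Int) =>
        ((bSplit row).foldl (bProcessRun transpose st.2) st.1, st.2 + 1)) := by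
    funext st row
    rw [row_eq]
  rw [h]
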